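-- pv_equiv track=rewrite | github.com/ntiggemann/ntiggemann.github.io | plot_tropical_hypersurfaces_3dim_v1.3.py | bothAreIn
-- ===== SOURCE A (Python) =====
-- def bothAreIn(i1,j1,k1,i2,j2,k2,list_is,list_js,list_ks):
--     '''
--     Args:
--         i1,j1,k1,i2,j2,k2 (int): Two exponents of monomials
--     Returns:
--         true if (i1,j1,k1), (i2,j2,k2) both are in {(list_is[l],list_js[l],list_ks[l])|l}
--     '''
--     exp1 = [i1,j1,k1]
--     exp2 = [i2,j2,k2]
--     exps = []
--     for i in range(0,len(list_is)):
--         exps.append([list_is[i],list_js[i],list_ks[i]])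
--     if (exp1 in exps) and (exp2 in exps):
--         return True
--     else:
--         return False
-- ===== SOURCE B (Python) =====
-- def bothAreIn(i1, j1, k1, i2, j2, k2, list_is, list_js, list_ks):
--     need = {(i1, j1, k1), (i2, j2, k2)}
--     for t in zip(list_is, list_js, list_ks):
--         need.discard(t)
--         if not need:
--             return True
--     return False
-- ===== Notes on version B (the rewrite author's own statement) =====
-- stated objective: alternative
-- what changed: B replaces A's build-the-full-triple-list-then-two-membership-scans by a shrinking set of outstanding target triples: it iterates zip(list_is,list_js,list_ks), discards each seen triple from the need-set, and returns True as soon as the set is empty — no triple list is materialised, no 'in' scans run, and the loop exits early once both targets are seen.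
import Mathlib
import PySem

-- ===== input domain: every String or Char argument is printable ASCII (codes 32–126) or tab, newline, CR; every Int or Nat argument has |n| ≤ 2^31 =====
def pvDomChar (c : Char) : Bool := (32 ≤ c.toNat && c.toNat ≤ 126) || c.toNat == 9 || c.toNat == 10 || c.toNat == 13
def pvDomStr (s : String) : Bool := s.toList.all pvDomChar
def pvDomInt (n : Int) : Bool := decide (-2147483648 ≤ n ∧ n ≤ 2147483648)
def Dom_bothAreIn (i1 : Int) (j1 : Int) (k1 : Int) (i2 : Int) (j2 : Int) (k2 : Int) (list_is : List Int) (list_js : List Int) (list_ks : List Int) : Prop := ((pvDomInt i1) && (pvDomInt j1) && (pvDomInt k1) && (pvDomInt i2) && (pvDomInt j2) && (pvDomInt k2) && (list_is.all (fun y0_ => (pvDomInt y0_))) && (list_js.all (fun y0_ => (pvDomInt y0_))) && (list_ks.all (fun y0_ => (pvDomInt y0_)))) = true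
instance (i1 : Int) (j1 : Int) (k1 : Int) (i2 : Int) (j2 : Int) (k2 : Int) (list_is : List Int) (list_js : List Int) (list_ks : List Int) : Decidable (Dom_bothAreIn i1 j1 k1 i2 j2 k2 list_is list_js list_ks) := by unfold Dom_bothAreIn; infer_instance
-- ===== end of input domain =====

-- B replaces A's build-the-full-triple-list-then-two-membership-scans by a shrinking need-set of
-- outstanding target triples consumed along zip(list_is,list_js,list_ks) (objective: alternative).
-- Where A raises IndexError (list_js/list_ks shorter than list_is), B's zip truncates and returns a value.

-- ===== PORT A =====
-- A's loop building 'exps'; none = IndexError raised inside the loop (list_js/list_ks too short)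
def buildExps (list_is : List Int) (list_js : List Int) (list_ks : List Int) : Option (List (List Int)) :=
  (List.range list_is.length).foldl
    (fun acc (i : Nat) =>
      match acc with
      | none => none
      | some exps =>
        match PySem.List.pyGet? list_is (i : Int), PySem.List.pyGet? list_js (i : Int),
              PySem.List.pyGet? list_ks (i : Int) with
        | some a, some b, some c => some (exps ++ [[a, b, c]])
        | _, _, _ => none)
    (some [])

def bothAreIn (i1 : Int) (j1 : Int) (k1 : Int) (i2 : Int) (j2 : Int) (k2 : Int) (list_is : List Int) (list_js : List Int) (list_ks : List Int) : Bool :=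
  let exp1 := [i1, j1, k1]
  let exp2 := [i2, j2, k2]
  match buildExps list_is list_js list_ks with
  | none => false  -- Python raises IndexError here; excluded by Pre_bothAreIn
  | some exps => if exp1 ∈ exps ∧ exp2 ∈ exps then true else false

-- ===== PORT B =====
-- Source B's for-loop over zip: discard the current triple from the need-set, early True once empty.
-- (The need-set is only discarded from and tested for emptiness — no hash-order dependence.)
def altNeedLoop (need : PySem.Set (Int × Int × Int)) (triples : List (Int × Int × Int)) : Bool :=
  match triples with
  | [] => false
  | t :: ts =>
    let need' := PySem.Set.discard need t
    if need'.isEmpty then true else altNeedLoop need' ts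

def bothAreIn_alt (i1 : Int) (j1 : Int) (k1 : Int) (i2 : Int) (j2 : Int) (k2 : Int) (list_is : List Int) (list_js : List Int) (list_ks : List Int) : Bool :=
  altNeedLoop (PySem.Set.ofList [(i1, j1, k1), (i2, j2, k2)]) (list_is.zip (list_js.zip list_ks))

-- ===== PRECONDITION & SPEC =====
-- Pre_ excludes exactly the inputs where A's loop raises IndexError: list_js or list_ks shorter than list_is.
def Pre_bothAreIn (i1 : Int) (j1 : Int) (k1 : Int) (i2 : Int) (j2 : Int) (k2 : Int) (list_is : List Int) (list_js : List Int) (list_ks : List Int) : Prop :=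
  list_is.length ≤ list_js.length ∧ list_is.length ≤ list_ks.length
instance (i1 : Int) (j1 : Int) (k1 : Int) (i2 : Int) (j2 : Int) (k2 : Int) (list_is : List Int) (list_js : List Int) (list_ks : List Int) : Decidable (Pre_bothAreIn i1 j1 k1 i2 j2 k2 list_is list_js list_ks) := by unfold Pre_bothAreIn; infer_instance

def pvWitness_bothAreIn : Int × Int × Int × Int × Int × Int × List Int × List Int × List Int :=
  (1, 2, 3, 1, 2, 3, [1], [2], [3])

def Spec_bothAreIn (i1 : Int) (j1 : Int) (k1 : Int) (i2 : Int) (j2 : Int) (k2 : Int) (list_is : List Int) (list_js : List Int) (list_ks : List Int) (out : Bool) : Prop := out = bothAreIn_alt i1 j1 k1 i2 j2 k2 list_is list_js list_ks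
instance (i1 : Int) (j1 : Int) (k1 : Int) (i2 : Int) (j2 : Int) (k2 : Int) (list_is : List Int) (list_js : List Int) (list_ks : List Int) (out : Bool) : Decidable (Spec_bothAreIn i1 j1 k1 i2 j2 k2 list_is list_js list_ks out) := by unfold Spec_bothAreIn; infer_instance

-- ===== CLAIM (what is proved, stated in full; the proofs are below) =====
def Claim_equal_bothAreIn : Prop := ∀ (i1 : Int) (j1 : Int) (k1 : Int) (i2 : Int) (j2 : Int) (k2 : Int) (list_is : List Int) (list_js : List Int) (list_ks : List Int), Dom_bothAreIn i1 j1 k1 i2 j2 k2 list_is list_js list_ks → Pre_bothAreIn i1 j1 k1 i2 j2 k2 list_is list_js list_ks → Spec_bothAreIn i1 j1 k1 i2 j2 k2 list_is list_js list_ks (bothAreIn i1 j1 k1 i2 j2 k2 list_is list_js list_ks)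
-- ===== LEMMAS AND PROOFS =====

def tripAt (list_is : List Int) (list_js : List Int) (list_ks : List Int) (l : Nat) : List Int :=
  [list_is.getD l 0, list_js.getD l 0, list_ks.getD l 0]

def tripsUpTo (list_is : List Int) (list_js : List Int) (list_ks : List Int) : Nat → List (List Int)
  | 0 => []
  | m + 1 => tripsUpTo list_is list_js list_ks m ++ [tripAt list_is list_js list_ks m]

lemma buildExps_aux (list_is list_js list_ks : List Int)
    (hj : list_is.length ≤ list_js.length) (hk : list_is.length ≤ list_ks.length) :
    ∀ m, m ≤ list_is.length →
      (List.range m).foldl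
        (fun acc i =>
          match acc with
          | none => none
          | some exps =>
            match PySem.List.pyGet? list_is (i : Int), PySem.List.pyGet? list_js (i : Int),
                  PySem.List.pyGet? list_ks (i : Int) with
            | some a, some b, some c => some (exps ++ [[a, b, c]])
            | _, _, _ => none)
        (some []) = some (tripsUpTo list_is list_js list_ks m) := by
  intro m hm
  induction m with
  | zero => simp [tripsUpTo]
  | succ m ih =>
    rw [List.range_succ, List.foldl_append, ih (by omega)]
    have hm1 : m < list_is.length := by omega
    have hm2 : m < list_js.length := by omega
    have hm3 : m < list_ks.length := by omega
    have h1 : list_is[m]? = some list_is[m] := List.getElem?_eq_getElem hm1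
    have h2 : list_js[m]? = some list_js[m] := List.getElem?_eq_getElem hm2
    have h3 : list_ks[m]? = some list_ks[m] := List.getElem?_eq_getElem hm3
    simp only [List.foldl_cons, List.foldl_nil, PySem.List.pyGet?_natCast, h1, h2, h3,
      tripsUpTo, tripAt]
    rw [List.getD_eq_getElem _ _ hm1, List.getD_eq_getElem _ _ hm2, List.getD_eq_getElem _ _ hm3]

lemma buildExps_eq (list_is list_js list_ks : List Int)
    (hj : list_is.length ≤ list_js.length) (hk : list_is.length ≤ list_ks.length) :
    buildExps list_is list_js list_ks
      = some (tripsUpTo list_is list_js list_ks list_is.length) := by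
  unfold buildExps
  exact buildExps_aux list_is list_js list_ks hj hk list_is.length (le_refl _)

lemma mem_tripsUpTo (list_is list_js list_ks : List Int) (e : List Int) :
    ∀ m, e ∈ tripsUpTo list_is list_js list_ks m ↔
      ∃ l, l < m ∧ tripAt list_is list_js list_ks l = e := by
  intro m
  induction m with
  | zero => simp [tripsUpTo]
  | succ m ih =>
    simp only [tripsUpTo, List.mem_append, List.mem_singleton, ih]
    constructor
    · rintro (⟨l, hl, he⟩ | he)
      · exact ⟨l, by omega, he⟩
      · exact ⟨m, by omega, he.symm⟩
    · rintro ⟨l, hl, he⟩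
      rcases Nat.lt_succ_iff_lt_or_eq.mp hl with h | h
      · exact Or.inl ⟨l, h, he⟩
      · exact Or.inr (by rw [← he, h])

-- the need-set loop decides "every outstanding target occurs among the remaining triples"
lemma altNeedLoop_eq (need : PySem.Set (Int × Int × Int)) (ts : List (Int × Int × Int))
    (hne : need ≠ []) :
    altNeedLoop need ts = need.all (fun x => decide (x ∈ ts)) := by
  induction ts generalizing need with
  | nil =>
    rw [altNeedLoop]
    obtain ⟨h, tl, rfl⟩ := List.exists_cons_of_ne_nil hne
    simp
  | cons t ts ih =>
    rw [altNeedLoop]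
    by_cases hemp : (PySem.Set.discard need t).isEmpty
    · rw [if_pos hemp]
      have hall : need.all (fun x => decide (x ∈ t :: ts)) = true := by
        rw [List.all_eq_true]
        intro x hx
        rw [decide_eq_true_eq, List.mem_cons]
        by_cases hxt : x = t
        · exact Or.inl hxt
        · exfalso
          have : x ∈ PySem.Set.discard need t := (PySem.Set.mem_discard _ _ _).mpr ⟨hx, hxt⟩
          rw [List.isEmpty_iff] at hemp
          simp [hemp] at this
      rw [hall]
    · rw [if_neg hemp]
      have hne' : PySem.Set.discard need t ≠ [] := by
        intro h; rw [h] at hemp; simp at hemp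
      rw [ih _ hne']
      rw [Bool.eq_iff_iff, List.all_eq_true, List.all_eq_true]
      constructor
      · intro h x hx
        rw [decide_eq_true_eq, List.mem_cons]
        by_cases hxt : x = t
        · exact Or.inl hxt
        · have := h x ((PySem.Set.mem_discard _ _ _).mpr ⟨hx, hxt⟩)
          rw [decide_eq_true_eq] at this
          exact Or.inr this
      · intro h x hx
        obtain ⟨hxn, hxt⟩ := (PySem.Set.mem_discard _ _ _).mp hx
        have := h x hxn
        rw [decide_eq_true_eq, List.mem_cons] at this
        rw [decide_eq_true_eq]
        exact this.resolve_left hxt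

-- under Pre_, a triple is in A's exps list iff it is in B's zipped list
lemma mem_zip_iff_tripsUpTo (list_is list_js list_ks : List Int)
    (hj : list_is.length ≤ list_js.length) (hk : list_is.length ≤ list_ks.length)
    (a b c : Int) :
    ((a, (b, c)) ∈ list_is.zip (list_js.zip list_ks)) ↔
      [a, b, c] ∈ tripsUpTo list_is list_js list_ks list_is.length := by
  rw [mem_tripsUpTo]
  have hlen : (list_is.zip (list_js.zip list_ks)).length = list_is.length := by
    simp [List.length_zip]; omega
  constructor
  · intro hm
    obtain ⟨l, hl, he⟩ := List.mem_iff_getElem.mp hm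
    rw [hlen] at hl
    refine ⟨l, hl, ?_⟩
    have : (list_is.zip (list_js.zip list_ks))[l]'(by rw [hlen]; exact hl)
        = (list_is[l]'hl, (list_js[l]'(by omega), list_ks[l]'(by omega))) := by
      simp [List.getElem_zip]
    rw [this] at he
    obtain ⟨e1, e2, e3⟩ : list_is[l]'hl = a ∧ list_js[l]'(by omega) = b ∧ list_ks[l]'(by omega) = c := by
      simpa [Prod.ext_iff] using he
    show [list_is.getD l 0, list_js.getD l 0, list_ks.getD l 0] = [a, b, c]
    rw [List.getD_eq_getElem _ _ hl, List.getD_eq_getElem _ _ (show l < list_js.length by omega),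
      List.getD_eq_getElem _ _ (show l < list_ks.length by omega), e1, e2, e3]
  · rintro ⟨l, hl, he⟩
    have e1 : list_is.getD l 0 = a := by
      have := congrArg (fun xs => xs.getD 0 1) he; simpa [tripAt] using this
    have e2 : list_js.getD l 0 = b := by
      have := congrArg (fun xs => xs.getD 1 1) he; simpa [tripAt] using this
    have e3 : list_ks.getD l 0 = c := by
      have := congrArg (fun xs => xs.getD 2 1) he; simpa [tripAt] using this
    apply List.mem_iff_getElem.mpr
    refine ⟨l, by rw [hlen]; exact hl, ?_⟩
    rw [List.getD_eq_getElem _ _ hl] at e1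
    rw [List.getD_eq_getElem _ _ (show l < list_js.length by omega)] at e2
    rw [List.getD_eq_getElem _ _ (show l < list_ks.length by omega)] at e3
    simp [List.getElem_zip, e1, e2, e3]

-- ===== VERDICT (by name: the statement is the Claim_ definition above) =====
theorem bothAreIn_spec : Claim_equal_bothAreIn := by
  intro i1 j1 k1 i2 j2 k2 list_is list_js list_ks _ hpre
  obtain ⟨hj, hk⟩ := hpre
  unfold Spec_bothAreIn bothAreIn bothAreIn_alt
  rw [buildExps_eq list_is list_js list_ks hj hk]
  have hne : PySem.Set.ofList [(i1, j1, k1), (i2, j2, k2)] ≠ [] := by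
    intro h
    have : (i1, j1, k1) ∈ PySem.Set.ofList [(i1, j1, k1), (i2, j2, k2)] :=
      (PySem.Set.mem_ofList _ _).mpr (by simp)
    rw [h] at this; simp at this
  rw [altNeedLoop_eq _ _ hne]
  have hiff1 := mem_zip_iff_tripsUpTo list_is list_js list_ks hj hk i1 j1 k1
  have hiff2 := mem_zip_iff_tripsUpTo list_is list_js list_ks hj hk i2 j2 k2
  show (if [i1, j1, k1] ∈ tripsUpTo list_is list_js list_ks list_is.length ∧
      [i2, j2, k2] ∈ tripsUpTo list_is list_js list_ks list_is.length then true else false) = _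
  by_cases hc : [i1, j1, k1] ∈ tripsUpTo list_is list_js list_ks list_is.length ∧
      [i2, j2, k2] ∈ tripsUpTo list_is list_js list_ks list_is.length
  · rw [if_pos hc]
    symm
    rw [List.all_eq_true]
    intro x hx
    have hx' := (PySem.Set.mem_ofList _ _).mp hx
    rw [decide_eq_true_eq]
    rcases List.mem_cons.mp hx' with h | h
    · rw [h]; exact hiff1.mpr hc.1
    · rw [List.mem_singleton.mp h]; exact hiff2.mpr hc.2
  · rw [if_neg hc]
    symm
    rw [List.all_eq_false]
    rcases Decidable.not_and_iff_or_not.mp hc with h | h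
    · exact ⟨(i1, j1, k1), (PySem.Set.mem_ofList _ _).mpr (by simp),
        by simpa using fun hm => h (hiff1.mp hm)⟩
    · exact ⟨(i2, j2, k2), (PySem.Set.mem_ofList _ _).mpr (by simp),
        by simpa using fun hm => h (hiff2.mp hm)⟩
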